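-- pv_equiv track=rewrite | github.com/skandhan-MN/Fullstack_dev_Practice | Python/week10/Day3/Q3.py | performXOR
-- ===== SOURCE A (Python) =====
-- def performXOR(x, y):
-- 	res = 0
--
-- 	# Assuming 32-bit Integer
-- 	for i in range(31, -1, -1):
--
-- 		b1 = x & (1 << i)
-- 		b2 = y & (1 << i)
-- 		b1 = min(b1, 1)
-- 		b2 = min(b2, 1)
--
-- 		xorOP = 0
-- 		if (b1 & b2):
-- 			xorOP = 0
-- 		else:
-- 			xorOP = (b1 | b2)
--
-- 		res <<= 1
-- 		res |= xorOP
-- 	return res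
-- ===== SOURCE B (Python) =====
-- def performXOR(x, y):
-- 	# closed form: XOR the two integers and mask to the low 32 bits
-- 	return (x ^ y) & 0xFFFFFFFF
-- ===== Notes on version B (the rewrite author's own statement) =====
-- stated objective: simpler
-- what changed: Replaced the 32-iteration per-bit loop (mask, clamp, branch, shift-or accumulate) with the closed form (x ^ y) & 0xFFFFFFFF.
import Mathlib
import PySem

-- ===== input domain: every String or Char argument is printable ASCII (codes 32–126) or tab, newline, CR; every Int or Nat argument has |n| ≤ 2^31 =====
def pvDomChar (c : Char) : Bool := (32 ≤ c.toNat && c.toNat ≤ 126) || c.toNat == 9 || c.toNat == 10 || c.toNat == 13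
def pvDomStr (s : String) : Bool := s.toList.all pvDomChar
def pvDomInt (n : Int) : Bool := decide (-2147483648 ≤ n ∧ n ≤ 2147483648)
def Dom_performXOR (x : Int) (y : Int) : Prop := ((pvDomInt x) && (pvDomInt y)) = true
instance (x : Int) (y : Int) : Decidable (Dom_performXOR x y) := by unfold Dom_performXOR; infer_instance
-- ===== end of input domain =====

-- B replaces A's 32-iteration per-bit loop by the closed form (x ^ y) & 0xFFFFFFFF (simpler).

-- ===== PORT A =====
-- the loop indices i run over 31..0, so i.toNat is exact for the shift amount
def performXOR (x : Int) (y : Int) : Int :=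
  (PySem.List.pyRange 31 (-1) (-1)).foldl (fun res i =>
    let b1 := PySem.Int.band x ((1 : Int) <<< i.toNat)
    let b2 := PySem.Int.band y ((1 : Int) <<< i.toNat)
    let b1 := min b1 1
    let b2 := min b2 1
    let xorOP : Int := if PySem.Int.band b1 b2 ≠ 0 then 0 else PySem.Int.bor b1 b2
    PySem.Int.bor (res <<< (1 : Nat)) xorOP) 0

-- ===== PORT B =====
def performXOR_alt (x : Int) (y : Int) : Int :=
  PySem.Int.band (PySem.Int.bxor x y) 4294967295

-- ===== PRECONDITION & SPEC =====
def Spec_performXOR (x : Int) (y : Int) (out : Int) : Prop := out = performXOR_alt x y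
instance (x : Int) (y : Int) (out : Int) : Decidable (Spec_performXOR x y out) := by unfold Spec_performXOR; infer_instance

-- ===== CLAIM (what is proved, stated in full; the proofs are below) =====
def Claim_equal_performXOR : Prop := ∀ (x : Int) (y : Int), Dom_performXOR x y → Spec_performXOR x y (performXOR x y)

-- ===== LEMMAS AND PROOFS =====

theorem pv_negSucc_sub_toNat (m : Nat) : (-(Int.negSucc m) - 1).toNat = m := by
  simp [Int.negSucc_eq]

theorem pv_negSucc_not_nonneg (m : Nat) : ¬ ((0:Int) ≤ Int.negSucc m) := by
  rw [Int.negSucc_eq]; omega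

-- x & 2^k picks out bit k
theorem pv_band_two_pow (x : Int) (k : Nat) :
    PySem.Int.band x (((2 ^ k : Nat) : Int)) = if x.testBit k then ((2 ^ k : Nat) : Int) else 0 := by
  have h1 : (0 : Int) ≤ ((2 ^ k : Nat) : Int) := by positivity
  have ht : (((2 ^ k : Nat) : Int)).toNat = 2 ^ k := Int.toNat_natCast _
  cases x with
  | ofNat a =>
    have h0 : (0 : Int) ≤ Int.ofNat a := Int.natCast_nonneg a
    rw [PySem.Int.band, if_pos h0, if_pos h1]
    have ha : (Int.ofNat a).toNat = a := rfl
    rw [ha, ht, Nat.and_two_pow]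
    have hb : (Int.ofNat a).testBit k = a.testBit k := rfl
    rw [hb]
    cases a.testBit k <;> simp
  | negSucc m =>
    rw [PySem.Int.band, if_neg (pv_negSucc_not_nonneg m), if_pos h1]
    rw [ht, pv_negSucc_sub_toNat, Nat.two_pow_and]
    have hb : (Int.negSucc m).testBit k = !(m.testBit k) := rfl
    rw [hb]
    cases m.testBit k <;> simp

-- min(x & (1 << k), 1) is bit k of x as 0/1
theorem pv_min_band (x : Int) (n : Nat) :
    min (PySem.Int.band x ((1 : Int) <<< (n : Int))) 1 = if x.testBit n then (1 : Int) else 0 := by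
  rw [Int.one_shiftLeft, pv_band_two_pow]
  have hp : (1:Int) ≤ ((2 ^ n : Nat) : Int) := by exact_mod_cast (Nat.one_le_two_pow (n := n))
  cases x.testBit n
  · simp
  · simpa using min_eq_right hp

-- the branch computes XOR on 0/1 bits
theorem pv_xor_sel (t1 t2 : Bool) :
    (if PySem.Int.band (if t1 then (1:Int) else 0) (if t2 then (1:Int) else 0) ≠ 0
      then (0:Int) else PySem.Int.bor (if t1 then (1:Int) else 0) (if t2 then (1:Int) else 0))
    = if xor t1 t2 then (1:Int) else 0 := by
  cases t1 <;> cases t2 <;> decide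

theorem pv_two_mul_or_one (a : Nat) : 2*a ||| 1 = 2*a+1 := by
  apply Nat.eq_of_testBit_eq; intro i
  cases i with
  | zero => simp [Nat.testBit_zero]
  | succ j =>
    rw [Nat.testBit_or, Nat.testBit_succ, Nat.testBit_succ, Nat.testBit_succ]
    have h1 : 2*a/2 = a := by omega
    have h2 : (2*a+1)/2 = a := by omega
    have h3 : (1:Nat)/2 = 0 := by omega
    rw [h1, h2, h3]; simp [Nat.zero_testBit]

theorem pv_shift_one (r : Int) : r <<< (1 : Nat) = 2 * r := by
  rw [Int.shiftLeft_eq]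
  ring

theorem pv_bor_two_mul_one (r : Int) : PySem.Int.bor (2 * r) 1 = 2 * r + 1 := by
  by_cases h0 : 0 ≤ r
  · rw [PySem.Int.bor_of_nonneg (by omega) (by omega)]
    have ht : (2*r).toNat = 2 * r.toNat := by omega
    have ho : (1:Int).toNat = 1 := rfl
    rw [ht, ho, pv_two_mul_or_one]
    push_cast; omega
  · rw [PySem.Int.bor, if_neg (by omega : ¬ (0:Int) ≤ 2*r), if_pos (by omega : (0:Int) ≤ 1)]
    have hm : (-(2*r) - 1).toNat = 2*((-r-1).toNat) + 1 := by omega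
    have ho : (1:Int).toNat = 1 := rfl
    rw [hm, ho]
    have hodd : 2*((-r-1).toNat) + 1 &&& 1 = 1 := by
      rw [Nat.and_one_is_mod]; omega
    rw [hodd]
    have : 2*((-r-1).toNat) + 1 - 1 = 2*((-r-1).toNat) := by omega
    rw [this]
    push_cast; omega

-- (res << 1) | b = 2*res + b for a single bit b
theorem pv_or_bit (r : Int) (t : Bool) :
    PySem.Int.bor (r <<< (1 : Nat)) (if t then (1:Int) else 0)
      = 2*r + (if t then (1:Int) else 0) := by
  rw [pv_shift_one]
  cases t with
  | false => simp [PySem.Int.bor_zero]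
  | true => simpa using pv_bor_two_mul_one r

-- bitwise characterisation of Python ^ on Int
theorem pv_neg_sub_one_eq_negSucc (n : Nat) : -((n:Int)) - 1 = Int.negSucc n := by
  rw [Int.negSucc_eq]; ring

theorem pv_bxor_testBit (x y : Int) (i : Nat) :
    (PySem.Int.bxor x y).testBit i = xor (x.testBit i) (y.testBit i) := by
  cases x with
  | ofNat a =>
    cases y with
    | ofNat b =>
      have ha0 : (0:Int) ≤ Int.ofNat a := Int.natCast_nonneg a
      have hb0 : (0:Int) ≤ Int.ofNat b := Int.natCast_nonneg b
      rw [PySem.Int.bxor, if_pos ha0, if_pos hb0]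
      have : ((Int.ofNat a).toNat ^^^ (Int.ofNat b).toNat) = a ^^^ b := rfl
      rw [this]
      have : ((a ^^^ b : Nat) : Int).testBit i = (a ^^^ b).testBit i := rfl
      rw [this, Nat.testBit_xor]
      have hxa : (Int.ofNat a).testBit i = a.testBit i := rfl
      have hyb : (Int.ofNat b).testBit i = b.testBit i := rfl
      rw [hxa, hyb]
    | negSucc b =>
      have ha0 : (0:Int) ≤ Int.ofNat a := Int.natCast_nonneg a
      rw [PySem.Int.bxor, if_pos ha0, if_neg (pv_negSucc_not_nonneg b)]
      have hb : (-(Int.negSucc b) - 1).toNat = b := pv_negSucc_sub_toNat b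
      rw [hb]
      have : ((Int.ofNat a).toNat ^^^ b) = a ^^^ b := rfl
      rw [this, pv_neg_sub_one_eq_negSucc]
      have : (Int.negSucc (a ^^^ b)).testBit i = !((a ^^^ b).testBit i) := rfl
      rw [this, Nat.testBit_xor]
      have hxa : (Int.ofNat a).testBit i = a.testBit i := rfl
      have hyb : (Int.negSucc b).testBit i = !(b.testBit i) := rfl
      rw [hxa, hyb]
      cases a.testBit i <;> cases b.testBit i <;> rfl
  | negSucc a =>
    cases y with
    | ofNat b =>
      have hb0 : (0:Int) ≤ Int.ofNat b := Int.natCast_nonneg b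
      rw [PySem.Int.bxor, if_neg (pv_negSucc_not_nonneg a), if_pos hb0]
      have ha : (-(Int.negSucc a) - 1).toNat = a := pv_negSucc_sub_toNat a
      rw [ha]
      have : (a ^^^ (Int.ofNat b).toNat) = a ^^^ b := rfl
      rw [this, pv_neg_sub_one_eq_negSucc]
      have : (Int.negSucc (a ^^^ b)).testBit i = !((a ^^^ b).testBit i) := rfl
      rw [this, Nat.testBit_xor]
      have hxa : (Int.negSucc a).testBit i = !(a.testBit i) := rfl
      have hyb : (Int.ofNat b).testBit i = b.testBit i := rfl
      rw [hxa, hyb]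
      cases a.testBit i <;> cases b.testBit i <;> rfl
    | negSucc b =>
      rw [PySem.Int.bxor, if_neg (pv_negSucc_not_nonneg a), if_neg (pv_negSucc_not_nonneg b)]
      rw [pv_negSucc_sub_toNat, pv_negSucc_sub_toNat]
      have : ((a ^^^ b : Nat) : Int).testBit i = (a ^^^ b).testBit i := rfl
      rw [this, Nat.testBit_xor]
      have hxa : (Int.negSucc a).testBit i = !(a.testBit i) := rfl
      have hyb : (Int.negSucc b).testBit i = !(b.testBit i) := rfl
      rw [hxa, hyb]
      cases a.testBit i <;> cases b.testBit i <;> rfl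

-- Python mod of a negative by 2^32
theorem pv_mod_negSucc (m : Nat) :
    PySem.Int.mod (Int.negSucc m) 4294967296 = ((4294967295 - m % 4294967296 : Nat) : Int) := by
  rw [PySem.Int.mod_eq_emod_of_pos (by norm_num)]
  have h1 : (m:Int) % 4294967296 = ((m % 4294967296 : Nat) : Int) := by push_cast; rfl
  have h2 : m % 4294967296 < 4294967296 := by omega
  rw [Int.negSucc_eq]
  omega

theorem pv_mod_ofNat (a : Nat) :
    PySem.Int.mod (Int.ofNat a) 4294967296 = ((a % 4294967296 : Nat) : Int) := by
  rw [PySem.Int.mod_eq_emod_of_pos (by norm_num)]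
  have : (Int.ofNat a) = ((a : Nat) : Int) := rfl
  rw [this]
  push_cast; rfl

-- low bits of z agree with low bits of z mod 2^32
theorem pv_testBit_low (z : Int) (i : Nat) (hi : i < 32) :
    z.testBit i = ((PySem.Int.mod z 4294967296).toNat).testBit i := by
  cases z with
  | ofNat a =>
    rw [pv_mod_ofNat, Int.toNat_natCast]
    have : (4294967296 : Nat) = 2 ^ 32 := by norm_num
    rw [this, Nat.testBit_mod_two_pow]
    simp [hi, Int.testBit]
  | negSucc m =>
    rw [pv_mod_negSucc, Int.toNat_natCast]
    have h2 : m % 4294967296 < 2 ^ 32 := by omega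
    have h3 : (4294967295 - m % 4294967296 : Nat) = 2 ^ 32 - (m % 4294967296 + 1) := by omega
    rw [h3, Nat.testBit_two_pow_sub_succ h2]
    have : (4294967296 : Nat) = 2 ^ 32 := by norm_num
    rw [this, Nat.testBit_mod_two_pow]
    simp [hi, Int.testBit]

-- B's mask is reduction mod 2^32
theorem pv_band_mask (z : Int) :
    PySem.Int.band z 4294967295 = ((PySem.Int.mod z 4294967296).toNat : Int) := by
  have hmask : (4294967295 : Int).toNat = 4294967295 := rfl
  cases z with
  | ofNat a =>
    have ha0 : (0:Int) ≤ Int.ofNat a := Int.natCast_nonneg a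
    rw [PySem.Int.band, if_pos ha0, if_pos (by norm_num : (0:Int) ≤ 4294967295)]
    rw [hmask]
    have ha : (Int.ofNat a).toNat = a := rfl
    rw [ha]
    have : (4294967295 : Nat) = 2 ^ 32 - 1 := by norm_num
    rw [this, Nat.and_two_pow_sub_one_eq_mod, pv_mod_ofNat, Int.toNat_natCast]
  | negSucc m =>
    rw [PySem.Int.band, if_neg (pv_negSucc_not_nonneg m), if_pos (by norm_num : (0:Int) ≤ 4294967295)]
    rw [hmask, pv_negSucc_sub_toNat]
    have : (4294967295 : Nat) &&& m = m % 4294967296 := by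
      rw [Nat.and_comm]
      have : (4294967295 : Nat) = 2 ^ 32 - 1 := by norm_num
      rw [this, Nat.and_two_pow_sub_one_eq_mod]
    rw [this, pv_mod_negSucc, Int.toNat_natCast]

-- loop invariant: folding the bits of N from high to low rebuilds N mod 2^k
theorem pv_foldl_bits (N : Nat) : ∀ (k : Nat) (acc : Int),
    ((List.range k).reverse).foldl
      (fun res i => 2*res + (if N.testBit i then (1:Int) else 0)) acc
      = acc * 2 ^ k + ((N % 2 ^ k : Nat) : Int) := by
  intro k
  induction k with
  | zero => intro acc; simp
  | succ k ih =>
    intro acc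
    rw [List.range_succ, List.reverse_append]
    simp only [List.reverse_singleton, List.singleton_append, List.foldl_cons]
    rw [ih]
    have hmul : (2:Nat) ^ (k+1) = 2 ^ k * 2 := by ring
    rw [hmul, Nat.mod_mul]
    have hbit : N.testBit k = decide (N / 2 ^ k % 2 = 1) := Nat.testBit_eq_decide_div_mod_eq
    by_cases ht : N.testBit k
    · have hd : N / 2 ^ k % 2 = 1 := by rw [hbit] at ht; exact of_decide_eq_true ht
      rw [if_pos ht, hd]
      push_cast
      ring
    · have hd : N / 2 ^ k % 2 = 0 := by
        rw [hbit] at ht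
        simp at ht; omega
      rw [if_neg ht, hd]
      push_cast
      ring

-- ===== VERDICT (by name: the statement is the Claim_ definition above) =====
theorem performXOR_spec : Claim_equal_performXOR := by
  intro x y _
  unfold Spec_performXOR performXOR performXOR_alt
  set z := PySem.Int.bxor x y with hz
  set N := (PySem.Int.mod z 4294967296).toNat with hN
  rw [pv_band_mask]
  have hrange : PySem.List.pyRange 31 (-1) (-1) = ((List.range 32).reverse.map (Nat.cast : Nat → Int)) := by decide
  rw [hrange, List.foldl_map]
  rw [PySem.List.foldl_congr_mem _ _ (fun res i => 2*res + (if N.testBit i then (1:Int) else 0)) 0 ?_]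
  · rw [pv_foldl_bits]
    have hlt : PySem.Int.mod z 4294967296 < 4294967296 := PySem.Int.mod_lt (a := z) (by norm_num)
    have hge : 0 ≤ PySem.Int.mod z 4294967296 := PySem.Int.mod_nonneg (a := z) (by norm_num)
    have hNlt : N % 2 ^ 32 = N := by
      apply Nat.mod_eq_of_lt
      omega
    rw [hNlt]; ring
  · intro acc i hi
    rw [List.mem_reverse, List.mem_range] at hi
    simp only [Int.toNat_natCast]
    rw [pv_min_band, pv_min_band, pv_xor_sel, ← pv_bxor_testBit, ← hz, pv_testBit_low z i hi, ← hN, pv_or_bit]
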